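-- pv_equiv track=rewrite | github.com/Amos-Rodrigues-Dev/trybe-exercises | Desenvolvimento-Back-End/projects-backend/restaurant-orders/src/analyze_log.py | days_never_visited_per_customer
-- ===== SOURCE A (Python) =====
-- def days_never_visited_per_customer(customer, content):
--     all_days = set()
--     days = set()
--     for items in content:
--         all_days.add(items[2])
--         if items[0] == customer:
--             days.add(items[2])
--     return all_days.difference(days)
-- ===== SOURCE B (Python) =====
-- def days_never_visited_per_customer(customer, content):
--     # index pass: day -> set of customers who visited that day
--     visitors_by_day = {}
--     for items in content:
--         day_visitors = visitors_by_day.get(items[2], set())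
--         day_visitors.add(items[0])
--         visitors_by_day[items[2]] = day_visitors
--     # filter pass over the index
--     result = set()
--     for day, visitors in visitors_by_day.items():
--         if customer not in visitors:
--             result.add(day)
--     return result
-- ===== Notes on version B (the rewrite author's own statement) =====
-- stated objective: alternative
-- what changed: B first builds a day->visitors dict index over the log, then a separate filter pass over the index collects the days whose visitor set misses the customer, instead of A's single loop maintaining two flat day-sets and a final set difference.
import Mathlib
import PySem

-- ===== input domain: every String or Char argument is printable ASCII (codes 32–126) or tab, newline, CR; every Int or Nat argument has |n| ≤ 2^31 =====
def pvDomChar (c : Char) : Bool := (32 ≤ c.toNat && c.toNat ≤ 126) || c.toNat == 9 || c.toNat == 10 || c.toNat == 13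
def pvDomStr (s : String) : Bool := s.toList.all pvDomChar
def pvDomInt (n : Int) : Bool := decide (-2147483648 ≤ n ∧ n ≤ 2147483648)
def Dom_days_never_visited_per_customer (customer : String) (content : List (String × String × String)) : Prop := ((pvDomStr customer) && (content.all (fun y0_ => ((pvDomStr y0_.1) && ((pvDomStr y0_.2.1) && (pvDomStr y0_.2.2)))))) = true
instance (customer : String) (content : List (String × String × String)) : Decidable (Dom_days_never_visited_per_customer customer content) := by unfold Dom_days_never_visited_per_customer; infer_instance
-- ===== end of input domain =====

-- B builds a day→visitors dict index then filters it, instead of A's two flat day-sets and a set difference; same cost, different decomposition.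


-- ===== PORT A =====
def days_never_visited_per_customer (customer : String) (content : List (String × String × String)) : List String :=
  let st := content.foldl
    (fun (p : PySem.Set String × PySem.Set String) items =>
      (PySem.Set.add p.1 items.2.2,
       if items.1 == customer then PySem.Set.add p.2 items.2.2 else p.2))
    (PySem.Set.empty, PySem.Set.empty)
  PySem.Set.diff st.1 st.2

-- ===== PORT B =====
def days_never_visited_per_customer_alt (customer : String) (content : List (String × String × String)) : List String :=
  let visitorsByDay : PySem.Dict String (PySem.Set String) := content.foldl
    (fun d items => d.modify items.2.2 PySem.Set.empty (fun s => PySem.Set.add s items.1))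
    PySem.Dict.empty
  visitorsByDay.items.foldl
    (fun (result : PySem.Set String) p =>
      if PySem.Set.contains p.2 customer then result else PySem.Set.add result p.1)
    PySem.Set.empty

-- ===== PRECONDITION & SPEC =====
def Spec_days_never_visited_per_customer (customer : String) (content : List (String × String × String)) (out : List String) : Prop := out = days_never_visited_per_customer_alt customer content
instance (customer : String) (content : List (String × String × String)) (out : List String) : Decidable (Spec_days_never_visited_per_customer customer content out) := by unfold Spec_days_never_visited_per_customer; infer_instance

-- ===== CLAIM (what is proved, stated in full; the proofs are below) =====
def Claim_equal_days_never_visited_per_customer : Prop := ∀ (customer : String) (content : List (String × String × String)), Dom_days_never_visited_per_customer customer content → Spec_days_never_visited_per_customer customer content (days_never_visited_per_customer customer content)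

-- ===== LEMMAS AND PROOFS =====

-- A's paired fold, first component: just the set of all days.
theorem pvA_fst (customer : String) (content : List (String × String × String))
    (a b : PySem.Set String) :
    (content.foldl
      (fun (p : PySem.Set String × PySem.Set String) items =>
        (PySem.Set.add p.1 items.2.2,
         if items.1 == customer then PySem.Set.add p.2 items.2.2 else p.2)) (a, b)).1
    = content.foldl (fun s items => PySem.Set.add s items.2.2) a := by
  induction content generalizing a b with
  | nil => rfl
  | cons x xs ih => simp only [List.foldl_cons]; exact ih _ _

-- A's paired fold, second component: the days the customer visited.
theorem pvA_snd (customer : String) (content : List (String × String × String))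
    (a b : PySem.Set String) :
    (content.foldl
      (fun (p : PySem.Set String × PySem.Set String) items =>
        (PySem.Set.add p.1 items.2.2,
         if items.1 == customer then PySem.Set.add p.2 items.2.2 else p.2)) (a, b)).2
    = content.foldl (fun s items => if items.1 == customer then PySem.Set.add s items.2.2 else s) b := by
  induction content generalizing a b with
  | nil => rfl
  | cons x xs ih =>
    simp only [List.foldl_cons]
    by_cases h : x.1 == customer
    · rw [if_pos h]; exact ih _ _
    · rw [if_neg h]; exact ih _ _

-- membership in A's customer-days set
theorem pvA_snd_mem (customer y : String) (content : List (String × String × String))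
    (b : PySem.Set String) :
    (y ∈ content.foldl (fun s items => if items.1 == customer then PySem.Set.add s items.2.2 else s) b)
    ↔ y ∈ b ∨ ∃ it ∈ content, it.1 = customer ∧ it.2.2 = y := by
  induction content generalizing b with
  | nil => simp
  | cons x xs ih =>
    simp only [List.foldl_cons]
    by_cases h : x.1 == customer
    · rw [if_pos h, ih]
      simp only [PySem.Set.mem_add, List.mem_cons]
      constructor
      · rintro ((hb | rfl) | ⟨it, hit, h1, h2⟩)
        · exact Or.inl hb
        · exact Or.inr ⟨x, Or.inl rfl, by simpa using h, rfl⟩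
        · exact Or.inr ⟨it, Or.inr hit, h1, h2⟩
      · rintro (hb | ⟨it, (rfl | hit), h1, h2⟩)
        · exact Or.inl (Or.inl hb)
        · exact Or.inl (Or.inr h2.symm)
        · exact Or.inr ⟨it, hit, h1, h2⟩
    · rw [if_neg h, ih]
      constructor
      · rintro (hb | ⟨it, hit, h1, h2⟩)
        · exact Or.inl hb
        · exact Or.inr ⟨it, List.mem_cons_of_mem _ hit, h1, h2⟩
      · rintro (hb | ⟨it, hit, h1, h2⟩)
        · exact Or.inl hb
        · rcases List.mem_cons.mp hit with rfl | hit'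
          · exact absurd (beq_iff_eq.mpr h1) (by simpa using h)
          · exact Or.inr ⟨it, hit', h1, h2⟩

-- membership of the customer in B's per-day visitor set
theorem pvB_getD_mem (customer day : String) (content : List (String × String × String))
    (d : PySem.Dict String (PySem.Set String)) :
    (customer ∈ (content.foldl
        (fun d items => d.modify items.2.2 PySem.Set.empty (fun s => PySem.Set.add s items.1)) d).getD day PySem.Set.empty)
    ↔ customer ∈ d.getD day PySem.Set.empty ∨ ∃ it ∈ content, it.1 = customer ∧ it.2.2 = day := by
  induction content generalizing d with
  | nil => simp
  | cons x xs ih =>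
    simp only [List.foldl_cons]
    rw [ih, PySem.Dict.getD_modify]
    split_ifs with h
    · constructor
      · rintro (hm | ⟨it, hit, h1, h2⟩)
        · rcases (PySem.Set.mem_add _ _ _).mp hm with h1 | rfl
          · exact Or.inl (h ▸ h1)
          · exact Or.inr ⟨x, List.mem_cons_self .., rfl, h.symm⟩
        · exact Or.inr ⟨it, List.mem_cons_of_mem _ hit, h1, h2⟩
      · rintro (hm | ⟨it, hit, h1, h2⟩)
        · exact Or.inl ((PySem.Set.mem_add _ _ _).mpr (Or.inl (h ▸ hm)))
        · rcases List.mem_cons.mp hit with rfl | hit'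
          · exact Or.inl ((PySem.Set.mem_add _ _ _).mpr (Or.inr h1.symm))
          · exact Or.inr ⟨it, hit', h1, h2⟩
    · constructor
      · rintro (hm | ⟨it, hit, h1, h2⟩)
        · exact Or.inl hm
        · exact Or.inr ⟨it, List.mem_cons_of_mem _ hit, h1, h2⟩
      · rintro (hm | ⟨it, hit, h1, h2⟩)
        · exact Or.inl hm
        · rcases List.mem_cons.mp hit with rfl | hit'
          · exact absurd h2.symm h
          · exact Or.inr ⟨it, hit', h1, h2⟩

-- B's filter loop over nodup items appends exactly the surviving keys.
theorem pvB_loop_filter (ks : List String) (p : String → Bool)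
    (acc : PySem.Set String) (hdisj : ∀ k ∈ ks, k ∉ acc) (hnd : ks.Nodup) :
    ks.foldl (fun (r : PySem.Set String) k => if p k then r else PySem.Set.add r k) acc
    = acc ++ ks.filter (fun k => !p k) := by
  induction ks generalizing acc with
  | nil => simp
  | cons k ks ih =>
    simp only [List.foldl_cons, List.filter_cons]
    by_cases h : p k
    · rw [if_pos h]
      simp only [h, Bool.not_true, ih acc (fun a ha => hdisj a (List.mem_cons_of_mem _ ha)) hnd.of_cons]
      rfl
    · rw [if_neg h, PySem.Set.add_of_not_mem (hdisj k (List.mem_cons_self ..))]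
      rw [ih (acc ++ [k]) ?_ hnd.of_cons]
      · simp [h]
      · intro a ha
        simp only [List.mem_append, List.mem_singleton]
        rintro (h1 | rfl)
        · exact hdisj a (List.mem_cons_of_mem _ ha) h1
        · exact (List.nodup_cons.mp hnd).1 ha

-- ===== VERDICT (by name: the statement is the Claim_ definition above) =====
theorem days_never_visited_per_customer_spec : Claim_equal_days_never_visited_per_customer := by
  intro customer content _
  unfold Spec_days_never_visited_per_customer days_never_visited_per_customer days_never_visited_per_customer_alt
  simp only []
  set d := content.foldl
    (fun d items => d.modify items.2.2 PySem.Set.empty (fun s => PySem.Set.add s items.1))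
    PySem.Dict.empty with hd
  have hnd : d.keys.Nodup := by
    rw [hd]
    exact PySem.Dict.nodup_keys_foldl_modify_key content (fun it => it.2.2) PySem.Set.empty
      (fun _ it s => PySem.Set.add s it.1) PySem.Dict.empty (by simp)
  have hkeys : d.keys = PySem.Set.ofList (content.map (fun it => it.2.2)) := by
    rw [hd]
    rw [PySem.Dict.keys_foldl_modify_key content (fun it => it.2.2) PySem.Set.empty
      (fun _ it s => PySem.Set.add s it.1) PySem.Dict.empty]
    exact PySem.Set.update_nil_left _
  -- the two membership characterisations, over the same log
  have hcharB : ∀ x, customer ∈ d.getD x PySem.Set.empty ↔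
      ∃ it ∈ content, it.1 = customer ∧ it.2.2 = x := by
    intro x
    rw [hd, pvB_getD_mem]
    simp [PySem.Dict.getD_empty, PySem.Set.empty]
  -- rewrite B's loop over items as a filter of the keys
  rw [PySem.Dict.items_eq_map_keys d hnd PySem.Set.empty, List.foldl_map]
  rw [pvB_loop_filter d.keys (fun k => PySem.Set.contains (d.getD k PySem.Set.empty) customer)
      PySem.Set.empty (by simp [PySem.Set.empty]) hnd]
  -- rewrite A's paired fold and its first component as the set of all days
  rw [pvA_fst, pvA_snd]
  rw [← PySem.Set.update_map_eq_foldl_add content (fun it => it.2.2) PySem.Set.empty,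
      PySem.Set.update_empty]
  unfold PySem.Set.diff
  rw [← hkeys, show (PySem.Set.empty : PySem.Set String) ++
      d.keys.filter (fun k => !(PySem.Set.contains (d.getD k PySem.Set.empty) customer)) = _ from
      List.nil_append _]
  apply List.filter_congr
  intro x hx
  congr 1
  rw [Bool.eq_iff_iff, PySem.Set.contains_iff, PySem.Set.contains_iff, hcharB x,
      pvA_snd_mem]
  simp only [PySem.Set.empty, List.not_mem_nil, false_or]
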